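-- pv_equiv track=rewrite | github.com/SeungyounShin/MultiThor | env.py | obj_mapping
-- ===== SOURCE A (Python) =====
-- def obj_mapping(object_list):
--     object_dict = {}
--     reverse_object_dict = {}
--     counter = {}
--
--     for obj in object_list:
--         obj_type = obj.split('|')[0].lower()
--         if obj_type not in counter:
--             counter[obj_type] = 1
--         else:
--             counter[obj_type] += 1
--         key = f'{obj_type}{counter[obj_type]}'
--         object_dict[key] = obj
--         reverse_object_dict[obj] = key  # vice-versa mapping
--
--     return object_dict, reverse_object_dict
-- ===== SOURCE B (Python) =====
-- def obj_mapping(object_list):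
--     # Two-phase group-then-number decomposition: group positions by type, number each
--     # group 1..k, scatter the keys back to positions, then build both dicts from zips.
--     types = [obj.split('|')[0].lower() for obj in object_list]
--     groups = {}
--     for i, t in enumerate(types):
--         groups.setdefault(t, []).append(i)
--     key_at = {}
--     for t, idxs in groups.items():
--         for n, i in enumerate(idxs, start=1):
--             key_at[i] = t + str(n)
--     keys = [key_at[i] for i in range(len(object_list))]
--     return dict(zip(keys, object_list)), dict(zip(object_list, keys))
-- ===== Notes on version B (the rewrite author's own statement) =====
-- stated objective: alternative
-- what changed: Replaces A's single pass with a mutable per-type running-counter dict by a group-then-number decomposition: group positions by type, number each group 1..k with enumerate, scatter the keys back to their positions, and build both result dicts from zips of the key and object lists.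
import Mathlib
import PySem

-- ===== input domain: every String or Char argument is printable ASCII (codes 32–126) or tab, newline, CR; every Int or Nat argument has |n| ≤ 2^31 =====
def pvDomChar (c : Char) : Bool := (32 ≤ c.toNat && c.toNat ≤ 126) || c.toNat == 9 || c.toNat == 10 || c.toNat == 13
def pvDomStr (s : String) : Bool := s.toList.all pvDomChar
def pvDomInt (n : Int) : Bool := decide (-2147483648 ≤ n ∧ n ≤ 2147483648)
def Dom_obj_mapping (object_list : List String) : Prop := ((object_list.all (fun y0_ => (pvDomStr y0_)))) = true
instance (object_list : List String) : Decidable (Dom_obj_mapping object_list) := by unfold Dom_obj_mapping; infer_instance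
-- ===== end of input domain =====

-- B replaces A's single-pass mutable running-counter dict by a group-then-number decomposition:
-- group positions by type, number each group 1..k, scatter the keys back to positions, and build
-- both dicts from zips; objective: alternative decomposition, same behaviour.

-- shared helper (identical expression in both Pythons): obj.split('|')[0].lower().
-- split with a nonempty separator is `some` and returns a nonempty list, so the [0]
-- never raises: `.getD []` and `.headD ""` are exact here.
def pvObjType (obj : String) : String :=
  PySem.Str.lower (((PySem.Str.split? obj "|").getD []).headD "")

-- ===== PORT A =====
def obj_mapping (object_list : List String) : (List (String × String)) × (List (String × String)) :=
  let st := object_list.foldl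
    (fun (s : PySem.Dict String String × PySem.Dict String String × PySem.Dict String Int) obj =>
      let obj_type := pvObjType obj
      -- 'counter[obj_type] += 1' reads an existing key (this branch), so getD is exact
      let counter := if ¬ (s.2.2.contains obj_type) then s.2.2.insert obj_type 1
                     else s.2.2.insert obj_type (s.2.2.getD obj_type 0 + 1)
      let key := obj_type ++ PySem.Int.toStr (counter.getD obj_type 0)
      (s.1.insert key obj, s.2.1.insert obj key, counter))
    (PySem.Dict.empty, PySem.Dict.empty, PySem.Dict.empty)
  (st.1.items, st.2.1.items)

-- ===== PORT B =====
def obj_mapping_alt (object_list : List String) : (List (String × String)) × (List (String × String)) :=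
  let types := object_list.map pvObjType
  -- groups.setdefault(t, []).append(i) appends i to groups.get(t, []): modify is exact
  let groups := (PySem.List.enumerate types 0).foldl
      (fun (d : PySem.Dict String (List Int)) p => d.modify p.2 [] (· ++ [p.1])) PySem.Dict.empty
  let key_at := groups.items.foldl
      (fun (d : PySem.Dict Int String) q =>
        (PySem.List.enumerate q.2 1).foldl (fun d r => d.insert r.2 (q.1 ++ PySem.Int.toStr r.1)) d)
      PySem.Dict.empty
  -- key_at[i]: every position 0..len-1 was assigned a key above, so getD never hits the default
  let keys := (PySem.List.pyRange 0 (object_list.length : Int) 1).map (fun i => key_at.getD i "")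
  ((PySem.Dict.ofList (keys.zip object_list)).items,
   (PySem.Dict.ofList (object_list.zip keys)).items)

-- ===== PRECONDITION & SPEC =====
def Spec_obj_mapping (object_list : List String) (out : (List (String × String)) × (List (String × String))) : Prop := out = obj_mapping_alt object_list
instance (object_list : List String) (out : (List (String × String)) × (List (String × String))) : Decidable (Spec_obj_mapping object_list out) := by unfold Spec_obj_mapping; infer_instance

-- ===== CLAIM (what is proved, stated in full; the proofs are below) =====
def Claim_equal_obj_mapping : Prop := ∀ (object_list : List String), Dom_obj_mapping object_list → Spec_obj_mapping object_list (obj_mapping object_list)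

-- ===== LEMMAS AND PROOFS =====

-- reference key sequence: key of each object given the list of types already seen (pre)
def keysRec : List String → List String → List String
  | _, [] => []
  | pre, t :: ts => (t ++ PySem.Int.toStr ((pre.count t : Int) + 1)) :: keysRec (pre ++ [t]) ts

theorem length_keysRec (ts : List String) : ∀ pre, (keysRec pre ts).length = ts.length := by
  induction ts with
  | nil => intro pre; rfl
  | cons t ts ih => intro pre; simp [keysRec, ih]

theorem keysRec_getElem? (ts : List String) : ∀ (pre : List String) (k : Nat) (_ : k < ts.length),
    (keysRec pre ts)[k]? = some (ts[k] ++ PySem.Int.toStr (((pre ++ ts.take k).count ts[k] : Int) + 1)) := by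
  induction ts with
  | nil => intro pre k h; simp at h
  | cons t ts ih =>
    intro pre k h
    cases k with
    | zero => simp [keysRec]
    | succ k =>
      have h' : k < ts.length := by simpa using h
      simp only [keysRec, List.getElem?_cons_succ, List.getElem_cons_succ, List.take_succ_cons]
      rw [ih (pre ++ [t]) k h']
      simp

-- the counter dict A maintains, as a fold
def cInv (ts : List String) : PySem.Dict String Int :=
  ts.foldl (fun d x => d.insert x (d.getD x 0 + 1)) PySem.Dict.empty

theorem cInv_getD (ts : List String) (t : String) : (cInv ts).getD t 0 = (ts.count t : Int) := by
  unfold cInv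
  rw [PySem.Dict.getD_foldl_insert_add_one]
  simp

theorem cInv_step (ts : List String) (t : String) :
    (if ¬ ((cInv ts).contains t) then (cInv ts).insert t 1
     else (cInv ts).insert t ((cInv ts).getD t 0 + 1)) = cInv (ts ++ [t]) := by
  have hc : cInv (ts ++ [t]) = (cInv ts).insert t ((cInv ts).getD t 0 + 1) := by
    unfold cInv; rw [List.foldl_append]; rfl
  by_cases h : (cInv ts).contains t = true
  · simp [h, hc]
  · have h0 : (cInv ts).getD t 0 = 0 :=
      PySem.Dict.getD_of_not_contains _ _ (by simpa using h)
    simp [h, hc, h0]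

-- A's loop, with counter = cInv ts, inserts exactly the keysRec keys
theorem A_loop (l : List String) : ∀ (ts : List String) (od rd : PySem.Dict String String),
    l.foldl
      (fun (s : PySem.Dict String String × PySem.Dict String String × PySem.Dict String Int) obj =>
        let obj_type := pvObjType obj
        let counter := if ¬ (s.2.2.contains obj_type) then s.2.2.insert obj_type 1
                       else s.2.2.insert obj_type (s.2.2.getD obj_type 0 + 1)
        let key := obj_type ++ PySem.Int.toStr (counter.getD obj_type 0)
        (s.1.insert key obj, s.2.1.insert obj key, counter))
      (od, rd, cInv ts)
    = (((keysRec ts (l.map pvObjType)).zip l).foldl (fun d p => d.insert p.1 p.2) od,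
       (l.zip (keysRec ts (l.map pvObjType))).foldl (fun d p => d.insert p.1 p.2) rd,
       cInv (ts ++ l.map pvObjType)) := by
  induction l with
  | nil => intro ts od rd; simp [keysRec]
  | cons obj l ih =>
    intro ts od rd
    rw [List.foldl_cons]
    have hstep := cInv_step ts (pvObjType obj)
    have hkey : (cInv (ts ++ [pvObjType obj])).getD (pvObjType obj) 0
        = (ts.count (pvObjType obj) : Int) + 1 := by
      rw [cInv_getD]; simp
    simp only [hstep, hkey]
    rw [ih (ts ++ [pvObjType obj])]
    simp [keysRec]

theorem ofList_eq_foldl {κ ν : Type} [BEq κ] (ps : List (κ × ν)) :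
    PySem.Dict.ofList ps = ps.foldl (fun d p => d.insert p.1 p.2) PySem.Dict.empty := by
  rfl

-- the positions of type t among ts, numbered from s (what B's `groups` stores per type)
def occ (ts : List String) (s : Int) (t : String) : List Int :=
  ((PySem.List.enumerate ts s).filter (fun p => p.2 == t)).map (·.1)

theorem occ_cons (x : String) (ts : List String) (s : Int) (t : String) :
    occ (x :: ts) s t = (if x == t then [s] else []) ++ occ ts (s + 1) t := by
  by_cases h : x == t <;> simp [occ, PySem.List.enumerate_cons, h]

theorem mem_occ (ts : List String) (s : Int) (t : String) (i : Int) :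
    i ∈ occ ts s t ↔ ∃ k, ∃ _ : k < ts.length, i = s + k ∧ ts[k] = t := by
  simp only [occ, List.mem_map, List.mem_filter, PySem.List.mem_enumerate_iff]
  constructor
  · rintro ⟨p, ⟨⟨k, hk, rfl⟩, hpt⟩, rfl⟩
    exact ⟨k, hk, rfl, by simpa using hpt⟩
  · rintro ⟨k, hk, rfl, rfl⟩
    exact ⟨(s + k, ts[k]), ⟨⟨k, hk, rfl⟩, by simp⟩, rfl⟩

theorem nodup_occ (ts : List String) (s : Int) (t : String) : (occ ts s t).Nodup := by
  have h2 : List.Pairwise (fun p q => p.1 < q.1)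
      ((PySem.List.enumerate ts s).filter (fun p => p.2 == t)) :=
    (PySem.List.pairwise_lt_enumerate ts s).filter _
  have h3 : List.Pairwise (fun a b => a < b)
      (((PySem.List.enumerate ts s).filter (fun p => p.2 == t)).map (fun p => p.1)) :=
    List.Pairwise.map (fun (p : Int × String) => p.1) (fun _ _ hab => hab) h2
  exact h3.imp (fun hab => ne_of_lt hab)

theorem occ_getElem? (ts : List String) : ∀ (s : Int) (i : Nat) (h : i < ts.length),
    (occ ts s ts[i])[(ts.take i).count ts[i]]? = some (s + i) := by
  induction ts with
  | nil => intro s i h; simp at h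
  | cons x ts ih =>
    intro s i h
    cases i with
    | zero => simp [occ_cons]
    | succ i =>
      have h' : i < ts.length := by simpa using h
      have hih := ih (s + 1) i h'
      simp only [List.getElem_cons_succ, List.take_succ_cons, List.count_cons]
      rw [occ_cons]
      by_cases hx : x = ts[i]
      · subst hx
        have hb : (ts[i] == ts[i]) = true := beq_self_eq_true ts[i]
        simp only [hb, if_true, List.singleton_append, List.getElem?_cons_succ]
        rw [hih]
        congr 1
        omega
      · have hbx : (x == ts[i]) = false := beq_eq_false_iff_ne.mpr hx
        simp only [hbx, Bool.false_eq_true, if_false, List.nil_append, Nat.add_zero]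
        rw [hih]
        congr 1
        omega

-- the flattened (position, key) pairs B's nested scatter loop inserts
def pairsP (ts : List String) : List (Int × String) :=
  (PySem.Set.ofList ts).flatMap
    (fun t => (PySem.List.enumerate (occ ts 0 t) 1).map (fun r => (r.2, t ++ PySem.Int.toStr r.1)))

theorem foldl_flatMap {α β γ : Type} (l : List α) (g : α → List β) (f : γ → β → γ) (init : γ) :
    (l.flatMap g).foldl f init = l.foldl (fun a x => (g x).foldl f a) init := by
  induction l generalizing init with
  | nil => rfl
  | cons x l ih => simp [List.flatMap_cons, List.foldl_append, ih]

theorem groups_getD (ts : List String) (t : String) :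
    (((PySem.List.enumerate ts 0).foldl
        (fun (d : PySem.Dict String (List Int)) p => d.modify p.2 [] (· ++ [p.1]))
        PySem.Dict.empty).getD t []) = occ ts 0 t := by
  have hswap : (PySem.List.enumerate ts 0).foldl
      (fun (d : PySem.Dict String (List Int)) p => d.modify p.2 [] (· ++ [p.1])) PySem.Dict.empty
      = ((PySem.List.enumerate ts 0).map Prod.swap).foldl
          (fun (d : PySem.Dict String (List Int)) p => d.modify p.1 [] (· ++ [p.2]))
          PySem.Dict.empty := by
    rw [List.foldl_map]
    rfl
  rw [hswap, PySem.Dict.getD_foldl_modify_append, List.filter_map, List.map_map]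
  simp only [PySem.Dict.getD_empty, List.nil_append]
  rfl

theorem groups_items (ts : List String) :
    ((PySem.List.enumerate ts 0).foldl
        (fun (d : PySem.Dict String (List Int)) p => d.modify p.2 [] (· ++ [p.1]))
        PySem.Dict.empty).items
    = (PySem.Set.ofList ts).map (fun t => (t, occ ts 0 t)) := by
  have hkeys0 := PySem.Dict.keys_foldl_modify_key (PySem.List.enumerate ts 0)
      (fun (p : Int × String) => p.2) ([] : List Int)
      (fun _ p cur => cur ++ [p.1]) PySem.Dict.empty
  simp only [] at hkeys0
  have hkeys : ((PySem.List.enumerate ts 0).foldl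
      (fun (d : PySem.Dict String (List Int)) p => d.modify p.2 [] (· ++ [p.1]))
      PySem.Dict.empty).keys = PySem.Set.ofList ts := by
    rw [hkeys0]
    simp [PySem.Dict.keys_empty, PySem.Set.update_nil_left, PySem.List.map_snd_enumerate]
  have hnd : ((PySem.List.enumerate ts 0).foldl
      (fun (d : PySem.Dict String (List Int)) p => d.modify p.2 [] (· ++ [p.1]))
      PySem.Dict.empty).keys.Nodup := by
    rw [hkeys]; exact PySem.Set.nodup_ofList ts
  rw [PySem.Dict.items_eq_map_keys _ hnd [], hkeys]
  exact List.map_congr_left (fun t _ => by rw [groups_getD])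

theorem keyat_eq (ts : List String) :
    (((PySem.List.enumerate ts 0).foldl
        (fun (d : PySem.Dict String (List Int)) p => d.modify p.2 [] (· ++ [p.1]))
        PySem.Dict.empty).items.foldl
      (fun (d : PySem.Dict Int String) q =>
        (PySem.List.enumerate q.2 1).foldl (fun d r => d.insert r.2 (q.1 ++ PySem.Int.toStr r.1)) d)
      PySem.Dict.empty)
    = PySem.Dict.ofList (pairsP ts) := by
  rw [groups_items, ofList_eq_foldl, pairsP, foldl_flatMap, List.foldl_map]
  congr 1
  funext d t
  rw [List.foldl_map]

theorem map_fst_pairsP (ts : List String) :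
    (pairsP ts).map (·.1) = (PySem.Set.ofList ts).flatMap (fun t => occ ts 0 t) := by
  simp only [pairsP, List.map_flatMap, List.map_map]
  congr 1
  funext t
  show (PySem.List.enumerate (occ ts 0 t) 1).map (·.2) = occ ts 0 t
  exact PySem.List.map_snd_enumerate _ _

theorem nodup_fsts_pairsP (ts : List String) : ((pairsP ts).map (·.1)).Nodup := by
  rw [map_fst_pairsP, List.nodup_flatMap]
  constructor
  · exact fun t _ => nodup_occ ts 0 t
  · refine (PySem.Set.nodup_ofList ts).imp ?_
    intro t t' hne i hi hi'
    rcases (mem_occ ts 0 t i).mp hi with ⟨k, hk, hik, hkt⟩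
    rcases (mem_occ ts 0 t' i).mp hi' with ⟨k', hk', hik', hkt'⟩
    have hkk : k = k' := by omega
    subst hkk
    exact hne (hkt.symm.trans hkt')

theorem items_pairsP (ts : List String) :
    (PySem.Dict.ofList (pairsP ts)).items = pairsP ts := by
  rw [ofList_eq_foldl]
  have hfresh : ∀ a ∈ pairsP ts, (PySem.Dict.empty : PySem.Dict Int String).contains a.1 = false :=
    fun a _ => PySem.Dict.contains_empty a.1
  have hnd : ((pairsP ts).map Prod.fst).Nodup := by
    have := nodup_fsts_pairsP ts
    simpa using this
  have := PySem.Dict.items_foldl_insert_fresh (pairsP ts) Prod.fst Prod.snd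
      PySem.Dict.empty hfresh hnd
  simpa using this

theorem keyat_getD (ts : List String) (i : Nat) (h : i < ts.length) :
    (PySem.Dict.ofList (pairsP ts)).getD ((0 : Int) + i) ""
      = ts[i] ++ PySem.Int.toStr (((ts.take i).count ts[i] : Int) + 1) := by
  have hocc := occ_getElem? ts 0 i h
  rcases List.getElem?_eq_some_iff.mp hocc with ⟨hr, helem⟩
  have hmem : ((0 : Int) + i,
      ts[i] ++ PySem.Int.toStr ((1 : Int) + ((ts.take i).count ts[i] : Int))) ∈ pairsP ts := by
    rw [pairsP, List.mem_flatMap]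
    refine ⟨ts[i], (PySem.Set.mem_ofList ts ts[i]).mpr (List.getElem_mem h), ?_⟩
    rw [List.mem_map]
    refine ⟨((1 : Int) + ((ts.take i).count ts[i] : Int), (occ ts 0 ts[i])[(ts.take i).count ts[i]]),
      ?_, by rw [helem]⟩
    rw [PySem.List.mem_enumerate_iff]
    exact ⟨(ts.take i).count ts[i], hr, rfl⟩
  have hg := PySem.Dict.getD_of_mem_items (PySem.Dict.ofList (pairsP ts))
      (by rw [items_pairsP]; exact hmem) (PySem.Dict.nodup_keys_ofList _) ""
  rw [hg]
  congr 2
  omega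

theorem keys_expr_eq (ts : List String) :
    (PySem.List.pyRange 0 (ts.length : Int) 1).map
      (fun i =>
        ((((PySem.List.enumerate ts 0).foldl
            (fun (d : PySem.Dict String (List Int)) p => d.modify p.2 [] (· ++ [p.1]))
            PySem.Dict.empty).items.foldl
          (fun (d : PySem.Dict Int String) q =>
            (PySem.List.enumerate q.2 1).foldl (fun d r => d.insert r.2 (q.1 ++ PySem.Int.toStr r.1)) d)
          PySem.Dict.empty).getD i ""))
    = keysRec [] ts := by
  rw [keyat_eq ts]
  apply List.ext_getElem
  · simp [PySem.List.length_pyRange_one, length_keysRec]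
  · intro k h1 h2
    have h3 : k < ts.length := by
      simpa [PySem.List.length_pyRange_one] using h1
    simp only [List.getElem_map, PySem.List.getElem_pyRange_one]
    rw [keyat_getD ts k h3]
    have h4 := keysRec_getElem? ts [] k h3
    rw [List.getElem?_eq_getElem h2] at h4
    have h5 := Option.some.inj h4
    rw [h5]
    simp

-- ===== VERDICT (by name: the statement is the Claim_ definition above) =====
theorem obj_mapping_spec : Claim_equal_obj_mapping := by
  intro l _
  unfold Spec_obj_mapping obj_mapping obj_mapping_alt
  have hk := keys_expr_eq (l.map pvObjType)
  simp only [List.length_map] at hk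
  rw [show (PySem.Dict.empty : PySem.Dict String Int) = cInv [] from rfl,
      A_loop l [] PySem.Dict.empty PySem.Dict.empty]
  simp only [ofList_eq_foldl, hk]
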